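-- pv_equiv track=rewrite | github.com/tasai-lab/appsheet-gas-automation | ツール/cleanup_code.py | remove_duplicate_jsdoc
-- ===== SOURCE A (Python) =====
-- def remove_duplicate_jsdoc(content):
--     """重複したJSDocコメントを削除"""
--     lines = content.split('\n')
--     result = []
--     prev_jsdoc = None
--     i = 0
--
--     while i < len(lines):
--         line = lines[i]
--
--         # JSDocコメント開始
--         if line.strip().startswith('/**'):
--             # JSDocコメント全体を取得
--             jsdoc_lines = [line]
--             i += 1
--             while i < len(lines) and not lines[i].strip().endswith('*/'):
--                 jsdoc_lines.append(lines[i])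
--                 i += 1
--             if i < len(lines):
--                 jsdoc_lines.append(lines[i])
--
--             jsdoc_text = '\n'.join(jsdoc_lines)
--
--             # 前のJSDocと同じ内容の場合はスキップ
--             if jsdoc_text.strip() != prev_jsdoc:
--                 result.extend(jsdoc_lines)
--                 prev_jsdoc = jsdoc_text.strip()
--             else:
--                 # 重複したJSDocはスキップ
--                 pass
--
--             i += 1
--         else:
--             result.append(line)
--             prev_jsdoc = None
--             i += 1
--
--     return '\n'.join(result)
-- ===== SOURCE B (Python) =====
-- def remove_duplicate_jsdoc(content):
--     """重複したJSDocコメントを削除 — two-phase: segment lines, then dedup-fold the segments"""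
--     lines = content.split('\n')
--     n = len(lines)
--     # Phase 1: split into segments (is_jsdoc, lines)
--     segments = []
--     i = 0
--     while i < n:
--         if lines[i].strip().startswith('/**'):
--             j = i + 1
--             while j < n and not lines[j].strip().endswith('*/'):
--                 j += 1
--             end = min(j + 1, n)
--             segments.append((True, lines[i:end]))
--             i = end
--         else:
--             segments.append((False, [lines[i]]))
--             i += 1
--     # Phase 2: keep a JSDoc segment only if it differs from the previously kept one
--     out = []
--     prev = None
--     for is_js, seg in segments:
--         if is_js:
--             text = '\n'.join(seg).strip()
--             if text != prev:
--                 out.extend(seg)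
--                 prev = text
--         else:
--             out.extend(seg)
--             prev = None
--     return '\n'.join(out)
-- ===== Notes on version B (the rewrite author's own statement) =====
-- stated objective: alternative
-- what changed: A's single interleaved while-loop (collecting a JSDoc block and deciding to emit it in the same scan) is split into two phases: segment the lines once into plain-line/JSDoc-block segments (block end found by an index scan plus a slice), then a separate fold over the segments that drops a JSDoc segment equal to the previously kept one.
import Mathlib
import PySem

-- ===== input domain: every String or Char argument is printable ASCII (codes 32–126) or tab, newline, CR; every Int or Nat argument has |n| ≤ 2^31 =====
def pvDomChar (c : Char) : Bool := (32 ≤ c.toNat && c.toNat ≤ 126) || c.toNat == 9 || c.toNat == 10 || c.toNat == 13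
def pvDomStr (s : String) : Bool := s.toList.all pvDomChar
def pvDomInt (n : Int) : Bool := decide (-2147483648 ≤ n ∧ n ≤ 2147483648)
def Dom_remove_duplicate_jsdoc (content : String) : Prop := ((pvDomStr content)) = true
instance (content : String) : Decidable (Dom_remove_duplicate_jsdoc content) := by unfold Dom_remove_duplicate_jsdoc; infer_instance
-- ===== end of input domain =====

-- B re-decomposes A's single interleaved scan into two phases (segment the lines, then
-- dedup-fold the segments); same result, objective: alternative decomposition.

-- ===== PORT A =====
-- inner while loop of A: collect lines up to and including the first one whose strip
-- ends with "*/" (or all remaining lines), returning (block tail, rest)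
def pvTakeBlockA : List String → List String × List String
  | [] => ([], [])
  | l :: ls =>
    if PySem.Str.endswith (PySem.Str.strip l) "*/" then ([l], ls)
    else
      let p := pvTakeBlockA ls
      (l :: p.1, p.2)

theorem pvTakeBlockA_snd_le : ∀ ls : List String, (pvTakeBlockA ls).2.length ≤ ls.length := by
  intro ls
  induction ls with
  | nil => simp [pvTakeBlockA]
  | cons l ls ih =>
    simp only [pvTakeBlockA]
    split
    · simp
    · simpa using Nat.le_succ_of_le ih

-- A's outer while loop over the remaining lines, state prev_jsdoc : Option String
def pvLoopA : List String → Option String → List String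
  | [], _ => []
  | l :: ls, prev =>
    if PySem.Str.startswith (PySem.Str.strip l) "/**" then
      let p := pvTakeBlockA ls
      let jsdoc := l :: p.1
      let text := PySem.Str.strip (PySem.Str.join "\n" jsdoc)
      if prev = some text then pvLoopA p.2 prev
      else jsdoc ++ pvLoopA p.2 (some text)
    else l :: pvLoopA ls none
termination_by ls _ => ls.length
decreasing_by
  · exact Nat.lt_succ_of_le (pvTakeBlockA_snd_le ls)
  · exact Nat.lt_succ_of_le (pvTakeBlockA_snd_le ls)
  · simp

def remove_duplicate_jsdoc (content : String) : String :=
  PySem.Str.join "\n" (pvLoopA ((PySem.Str.split? content "\n").getD []) none)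

-- ===== PORT B =====
-- Phase 1: segment the lines; a JSDoc segment runs from a "/**" line through the first
-- following line whose strip ends with "*/" (found by index scan + slice), or to EOF
def pvSegB : List String → List (Bool × List String)
  | [] => []
  | l :: ls =>
    if PySem.Str.startswith (PySem.Str.strip l) "/**" then
      match ls.findIdx? (fun x => PySem.Str.endswith (PySem.Str.strip x) "*/") with
      | some j => (true, l :: ls.take (j + 1)) :: pvSegB (ls.drop (j + 1))
      | none => [(true, l :: ls)]
    else (false, [l]) :: pvSegB ls
termination_by ls => ls.length
decreasing_by
  · simp only [List.length_drop, List.length_cons]; omega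
  · simp

-- Phase 2: one fold over the segments; state (prev kept JSDoc text, output lines)
def pvStepB (st : Option String × List String) (seg : Bool × List String) :
    Option String × List String :=
  if seg.1 then
    let text := PySem.Str.strip (PySem.Str.join "\n" seg.2)
    if some text ≠ st.1 then (some text, st.2 ++ seg.2) else st
  else (none, st.2 ++ seg.2)

def remove_duplicate_jsdoc_alt (content : String) : String :=
  PySem.Str.join "\n"
    ((pvSegB ((PySem.Str.split? content "\n").getD [])).foldl pvStepB (none, [])).2

-- ===== PRECONDITION & SPEC =====
def Spec_remove_duplicate_jsdoc (content : String) (out : String) : Prop := out = remove_duplicate_jsdoc_alt content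
instance (content : String) (out : String) : Decidable (Spec_remove_duplicate_jsdoc content out) := by unfold Spec_remove_duplicate_jsdoc; infer_instance

-- ===== CLAIM (what is proved, stated in full; the proofs are below) =====
def Claim_equal_remove_duplicate_jsdoc : Prop := ∀ (content : String), Dom_remove_duplicate_jsdoc content → Spec_remove_duplicate_jsdoc content (remove_duplicate_jsdoc content)

-- ===== LEMMAS AND PROOFS =====

-- A's hand-rolled block scan agrees with B's index-scan-and-slice formulation
theorem pvTakeBlockA_eq_findIdx? (ls : List String) :
    pvTakeBlockA ls =
      match ls.findIdx? (fun x => PySem.Str.endswith (PySem.Str.strip x) "*/") with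
      | some j => (ls.take (j + 1), ls.drop (j + 1))
      | none => (ls, []) := by
  induction ls with
  | nil => simp [pvTakeBlockA]
  | cons l ls ih =>
    by_cases h : PySem.Chars.endswith (PySem.Chars.strip l.toList) ['*', '/'] = true
    · simp [pvTakeBlockA, List.findIdx?_cons, h]
    · rw [List.findIdx?_cons]
      simp only [pvTakeBlockA, PySem.Str.endswith_eq, PySem.Str.strip]
      simp only [ih, PySem.Str.endswith_eq, PySem.Str.strip]
      cases hf : ls.findIdx? (fun x => PySem.Chars.endswith (PySem.Chars.strip x.toList) ['*', '/']) with
      | none => simp [h, hf]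
      | some j => simp [h, hf]

-- the two-phase fold produces exactly A's interleaved output, for any prev / accumulator
theorem pvFold_eq_loopA (ls : List String) :
    ∀ (prev : Option String) (out : List String),
      ((pvSegB ls).foldl pvStepB (prev, out)).2 = out ++ pvLoopA ls prev := by
  induction ls using pvSegB.induct with
  | case1 => intro prev out; simp [pvSegB, pvLoopA]
  | case2 l ls hstart j hf ih =>
    intro prev out
    rw [pvLoopA]
    simp only [pvSegB, hstart, if_true, hf, List.foldl_cons, pvTakeBlockA_eq_findIdx?]
    by_cases h : prev = some (PySem.Str.strip (PySem.Str.join "\n" (l :: List.take (j + 1) ls)))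
    · subst h; simp [pvStepB, ih]
    · have h' : some (PySem.Str.strip (PySem.Str.join "\n" (l :: List.take (j + 1) ls))) ≠ prev :=
        fun hh => h hh.symm
      simp [pvStepB, h, h', ih]
  | case3 l ls hstart hf =>
    intro prev out
    rw [pvLoopA]
    simp only [pvSegB, hstart, if_true, hf, List.foldl_cons, List.foldl_nil,
      pvTakeBlockA_eq_findIdx?]
    by_cases h : prev = some (PySem.Str.strip (PySem.Str.join "\n" (l :: ls)))
    · subst h; simp [pvStepB, pvLoopA]
    · have h' : some (PySem.Str.strip (PySem.Str.join "\n" (l :: ls))) ≠ prev := fun hh => h hh.symm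
      simp [pvStepB, h, h', pvLoopA]
  | case4 l ls hstart ih =>
    intro prev out
    rw [pvLoopA]
    simp only [pvSegB, hstart, Bool.false_eq_true, if_false, List.foldl_cons]
    simp [pvStepB, ih]

-- ===== VERDICT (by name: the statement is the Claim_ definition above) =====
theorem remove_duplicate_jsdoc_spec : Claim_equal_remove_duplicate_jsdoc := by
  intro content _
  unfold Spec_remove_duplicate_jsdoc remove_duplicate_jsdoc remove_duplicate_jsdoc_alt
  rw [pvFold_eq_loopA]
  simp
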